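-- pv_equiv track=rewrite | github.com/SrihithaReddy13/CSCI_561_Fall_2021 | HW2/my_player3.py | stones_died
-- ===== SOURCE A (Python) =====
-- def detect_neighbor(i, j):
--     neighbors = []
--     coordinates = [(0, -1), (0, 1), (1, 0), (-1, 0)]
--     neighbors = [(i+c[0],j+c[1]) for c in coordinates if (0<=j+c[1]<5 and 0<=i+c[0]<5)]
--     return neighbors
--
-- def chain_stones(i, j, board, my_colour):
--     stack = [(i, j)]
--     visited = {}
--     visited[(i,j)]=True
--     chain = []
--     while stack:
--         cur = stack.pop()
--         chain.append(cur)
--         for n in detect_neighbor(cur[0], cur[1]):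
--             if board[n[0]][n[1]] == my_colour:
--                 if n not in visited:
--                     stack.append(n)
--                     visited[n]=True
--     return chain
--
-- def has_liberty(i, j, board, my_colour):
--     for stone in chain_stones(i, j, board, my_colour):
--         for n in detect_neighbor(stone[0], stone[1]):
--             if board[n[0]][n[1]] == 0:
--                 return True
--     return False
--
-- def stones_died(my_colour, board):
--     dead = []
--     for i in range(0, 5):
--         for j in range(0, 5):
--             if board[i][j] == my_colour:
--                 if not has_liberty(i, j, board, my_colour):
--                     dead.append((i, j))
--     return dead
-- ===== SOURCE B (Python) =====
-- def stones_died(my_colour, board):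
--     # Liberty propagation: seed with stones touching an empty cell, then spread
--     # liberty through neighbouring stones of the same colour; survivors = alive.
--     cells = [(i, j) for i in range(5) for j in range(5)]
--
--     def neighbours(c):
--         i, j = c
--         return [(i + di, j + dj) for di, dj in ((0, -1), (0, 1), (1, 0), (-1, 0))
--                 if 0 <= i + di < 5 and 0 <= j + dj < 5]
--
--     mine = [c for c in cells if board[c[0]][c[1]] == my_colour]
--     alive = {c for c in mine if any(board[a][b] == 0 for a, b in neighbours(c))}
--     for _ in range(25):
--         alive |= {c for c in mine if any(n in alive for n in neighbours(c))}
--     return [c for c in mine if c not in alive]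
-- ===== Notes on version B (the rewrite author's own statement) =====
-- stated objective: alternative
-- what changed: Replaces the per-stone DFS (chain_stones + has_liberty re-flooding a whole chain for every one of its members) by a board-wide liberty-propagation fixpoint: seed the set of stones adjacent to an empty cell, spread liberty through same-colour neighbours for 25 rounds, and report the unreached stones in row-major order.
import Mathlib
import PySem

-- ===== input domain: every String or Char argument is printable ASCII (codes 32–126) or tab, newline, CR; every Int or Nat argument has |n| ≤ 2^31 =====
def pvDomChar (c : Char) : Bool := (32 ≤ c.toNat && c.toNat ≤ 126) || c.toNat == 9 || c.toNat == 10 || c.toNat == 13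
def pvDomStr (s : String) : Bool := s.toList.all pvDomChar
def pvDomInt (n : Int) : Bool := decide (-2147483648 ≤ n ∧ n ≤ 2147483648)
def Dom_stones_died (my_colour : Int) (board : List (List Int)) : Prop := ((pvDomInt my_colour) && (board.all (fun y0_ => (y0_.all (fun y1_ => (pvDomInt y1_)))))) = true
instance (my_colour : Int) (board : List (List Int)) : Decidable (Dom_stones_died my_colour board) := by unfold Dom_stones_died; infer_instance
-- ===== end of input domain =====

-- B replaces A's per-stone DFS by one board-wide liberty-propagation fixpoint (objective: alternative algorithm, same cost class).

-- shared indexing helper: board[i][j]; Pre_ guarantees every index used is in range, the default is never hit there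
def cellAt (board : List (List Int)) (p : Int × Int) : Int :=
  PySem.List.pyGetD (PySem.List.pyGetD board p.1 []) p.2 0

-- the 25 cells of the board (used by chainLoop's termination measure)
def pvGrid : List (Int × Int) :=
  [(0,0),(0,1),(0,2),(0,3),(0,4),(1,0),(1,1),(1,2),(1,3),(1,4),(2,0),(2,1),(2,2),(2,3),(2,4),
   (3,0),(3,1),(3,2),(3,3),(3,4),(4,0),(4,1),(4,2),(4,3),(4,4)]

-- ===== PORT A =====
def detect_neighbor (i j : Int) : List (Int × Int) :=
  (([((0:Int), (-1:Int)), (0, 1), (1, 0), (-1, 0)]).filter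
    (fun c => decide (0 ≤ j + c.2 ∧ j + c.2 < 5 ∧ 0 ≤ i + c.1 ∧ i + c.1 < 5))).map
    (fun c => (i + c.1, j + c.2))

-- body of the 'for n in detect_neighbor(...)' loop inside chain_stones
def chainPush (board : List (List Int)) (my_colour : Int)
    (sv : List (Int × Int) × PySem.Dict (Int × Int) Bool) (n : Int × Int) :
    List (Int × Int) × PySem.Dict (Int × Int) Bool :=
  if cellAt board n == my_colour then
    if sv.2.contains n then sv else (n :: sv.1, sv.2.insert n true)
  else sv

-- cells of the grid not yet visited (termination measure only)
def freeCount (v : PySem.Dict (Int × Int) Bool) : Nat :=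
  (pvGrid.filter (fun c => !v.contains c)).length

lemma pair_mem_pvGrid {a b : Int} (h1 : 0 ≤ a) (h2 : a < 5) (h3 : 0 ≤ b) (h4 : b < 5) :
    (a, b) ∈ pvGrid := by
  have ha : a = 0 ∨ a = 1 ∨ a = 2 ∨ a = 3 ∨ a = 4 := by omega
  have hb : b = 0 ∨ b = 1 ∨ b = 2 ∨ b = 3 ∨ b = 4 := by omega
  rcases ha with rfl|rfl|rfl|rfl|rfl <;> rcases hb with rfl|rfl|rfl|rfl|rfl <;> decide

lemma mem_pvGrid_of_mem_detect_neighbor {i j : Int} {n : Int × Int}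
    (h : n ∈ detect_neighbor i j) : n ∈ pvGrid := by
  simp only [detect_neighbor, List.mem_map, List.mem_filter] at h
  obtain ⟨c, ⟨hc, hcond⟩, rfl⟩ := h
  simp only [List.mem_cons, List.not_mem_nil, or_false] at hc
  simp only [decide_eq_true_eq] at hcond
  rcases hc with rfl|rfl|rfl|rfl <;> simp at hcond ⊢ <;>
    exact pair_mem_pvGrid (by omega) (by omega) (by omega) (by omega)

lemma length_filter_lt_length_filter {α : Type} (l : List α) (p q : α → Bool) (n : α)
    (hn : n ∈ l) (hpn : p n = true) (h : ∀ c, q c = true → p c = true ∧ c ≠ n) :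
    (l.filter q).length < (l.filter p).length := by
  induction l with
  | nil => cases hn
  | cons a t ih =>
    have hmono : ∀ (u : List α), (u.filter q).length ≤ (u.filter p).length := by
      intro u
      rw [← List.countP_eq_length_filter, ← List.countP_eq_length_filter]
      exact List.countP_mono_left (fun x _ hx => (h x hx).1)
    by_cases ha : a = n
    · subst ha
      have hqa : q a = false := by
        cases hq : q a
        · rfl
        · exact absurd rfl (h a hq).2
      simp only [List.filter_cons, hqa, hpn, if_true, Bool.false_eq_true, if_false,
        List.length_cons]
      exact Nat.lt_succ_of_le (hmono t)
    · have hn' : n ∈ t := by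
        rcases List.mem_cons.1 hn with rfl | h'
        · exact absurd rfl ha
        · exact h'
      have ihs := ih hn'
      cases hq : q a
      · simp only [List.filter_cons, hq, Bool.false_eq_true, if_false]
        cases hp : p a
        · simp only [Bool.false_eq_true, if_false]; exact ihs
        · simp only [if_true, List.length_cons]; omega
      · have hp : p a = true := (h a hq).1
        simp only [List.filter_cons, hq, hp, if_true, List.length_cons]
        omega

lemma chainPush_foldl_measure (board : List (List Int)) (my_colour : Int) :
    ∀ (L : List (Int × Int)), (∀ n ∈ L, n ∈ pvGrid) →
    ∀ (s : List (Int × Int)) (v : PySem.Dict (Int × Int) Bool),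
    2 * freeCount (L.foldl (chainPush board my_colour) (s, v)).2 +
      (L.foldl (chainPush board my_colour) (s, v)).1.length ≤ 2 * freeCount v + s.length := by
  intro L
  induction L with
  | nil => intro _ s v; simp
  | cons x t ih =>
    intro hL s v
    have hx : x ∈ pvGrid := hL x (List.mem_cons_self ..)
    have ht : ∀ n ∈ t, n ∈ pvGrid := fun n hn => hL n (List.mem_cons_of_mem _ hn)
    simp only [List.foldl_cons]
    by_cases hcol : cellAt board x == my_colour
    · by_cases hvis : v.contains x
      · simp only [chainPush, hcol, hvis, if_true]
        exact ih ht s v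
      · have hstep : chainPush board my_colour (s, v) x = (x :: s, v.insert x true) := by
          simp [chainPush, hcol, hvis]
        rw [hstep]
        have hlt : freeCount (v.insert x true) < freeCount v := by
          apply length_filter_lt_length_filter pvGrid (fun c => !v.contains c)
            (fun c => !(v.insert x true).contains c) x hx
          · simp [Bool.not_eq_true] at hvis ⊢; exact hvis
          · intro c hc
            simp only [Bool.not_eq_true'] at hc ⊢
            rw [PySem.Dict.contains_insert] at hc
            simp only [Bool.or_eq_false_iff, beq_eq_false_iff_ne] at hc
            exact ⟨hc.2, hc.1⟩
        have := ih ht (x :: s) (v.insert x true)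
        simp only [List.length_cons] at this ⊢
        omega
    · simp only [chainPush, hcol]
      simp only [Bool.false_eq_true, if_false]
      exact ih ht s v

def chainLoop (board : List (List Int)) (my_colour : Int) :
    List (Int × Int) → PySem.Dict (Int × Int) Bool → List (Int × Int) → List (Int × Int)
  | [], _, chain => chain
  | cur :: rest, visited, chain =>
    let sv := (detect_neighbor cur.1 cur.2).foldl (chainPush board my_colour) (rest, visited)
    chainLoop board my_colour sv.1 sv.2 (chain ++ [cur])
termination_by stack visited _ => 2 * freeCount visited + stack.length
decreasing_by
  have h := chainPush_foldl_measure board my_colour (detect_neighbor cur.1 cur.2)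
    (fun n hn => mem_pvGrid_of_mem_detect_neighbor hn) rest visited
  simp only [List.length_cons]
  omega

def chain_stones (i j : Int) (board : List (List Int)) (my_colour : Int) : List (Int × Int) :=
  chainLoop board my_colour [(i, j)] (PySem.Dict.empty.insert (i, j) true) []

def has_liberty (i j : Int) (board : List (List Int)) (my_colour : Int) : Bool :=
  (chain_stones i j board my_colour).any fun stone =>
    (detect_neighbor stone.1 stone.2).any fun n => cellAt board n == 0

def stones_died (my_colour : Int) (board : List (List Int)) : List (Int × Int) :=
  (PySem.List.pyRange 0 5 1).foldl (fun dead i =>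
    (PySem.List.pyRange 0 5 1).foldl (fun dead j =>
      if cellAt board (i, j) == my_colour then
        if !has_liberty i j board my_colour then dead ++ [(i, j)] else dead
      else dead) dead) []

-- ===== PORT B =====
def gridCells : List (Int × Int) :=
  (PySem.List.pyRange 0 5 1).flatMap fun i => (PySem.List.pyRange 0 5 1).map fun j => (i, j)

def neighboursB (c : Int × Int) : List (Int × Int) :=
  (([((0:Int), (-1:Int)), (0, 1), (1, 0), (-1, 0)]).filter
    (fun d => decide (0 ≤ c.1 + d.1 ∧ c.1 + d.1 < 5 ∧ 0 ≤ c.2 + d.2 ∧ c.2 + d.2 < 5))).map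
    (fun d => (c.1 + d.1, c.2 + d.2))

def mineB (my_colour : Int) (board : List (List Int)) : List (Int × Int) :=
  gridCells.filter fun c => cellAt board c == my_colour

def aliveStep (my_colour : Int) (board : List (List Int))
    (alive : PySem.Set (Int × Int)) : PySem.Set (Int × Int) :=
  PySem.Set.union alive
    (PySem.Set.ofList ((mineB my_colour board).filter fun c =>
      (neighboursB c).any fun n => PySem.Set.contains alive n))

def aliveB (my_colour : Int) (board : List (List Int)) : PySem.Set (Int × Int) :=
  (PySem.List.pyRange 0 25 1).foldl (fun alive _ => aliveStep my_colour board alive)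
    (PySem.Set.ofList ((mineB my_colour board).filter fun c =>
      (neighboursB c).any fun n => cellAt board n == 0))

def stones_died_alt (my_colour : Int) (board : List (List Int)) : List (Int × Int) :=
  (mineB my_colour board).filter fun c => !PySem.Set.contains (aliveB my_colour board) c

-- ===== PRECONDITION & SPEC =====
-- Pre_: exactly the inputs where Python A returns normally — A reads board[i][j] for all 0 ≤ i,j < 5
-- and raises IndexError when the board has fewer than 5 rows or an accessed row has fewer than 5 entries.
def Pre_stones_died (my_colour : Int) (board : List (List Int)) : Prop :=
  5 ≤ board.length ∧ ∀ r ∈ board.take 5, 5 ≤ r.length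
instance (my_colour : Int) (board : List (List Int)) : Decidable (Pre_stones_died my_colour board) := by
  unfold Pre_stones_died; infer_instance

def pvWitness_stones_died : Int × List (List Int) :=
  (1, [[1, 1, 0, 0, 0], [2, 2, 0, 0, 0], [0, 0, 0, 0, 0], [0, 0, 1, 2, 0], [0, 0, 2, 0, 0]])

def Spec_stones_died (my_colour : Int) (board : List (List Int)) (out : List (Int × Int)) : Prop := out = stones_died_alt my_colour board
instance (my_colour : Int) (board : List (List Int)) (out : List (Int × Int)) : Decidable (Spec_stones_died my_colour board out) := by unfold Spec_stones_died; infer_instance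

-- ===== CLAIM (what is proved, stated in full; the proofs are below) =====
def Claim_equal_stones_died : Prop := ∀ (my_colour : Int) (board : List (List Int)), Dom_stones_died my_colour board → Pre_stones_died my_colour board → Spec_stones_died my_colour board (stones_died my_colour board)

-- ===== LEMMAS AND PROOFS =====

-- specification-side vocabulary
def inG (p : Int × Int) : Prop := 0 ≤ p.1 ∧ p.1 < 5 ∧ 0 ≤ p.2 ∧ p.2 < 5

def adjP (p q : Int × Int) : Prop :=
  (q.1 = p.1 ∧ (q.2 = p.2 - 1 ∨ q.2 = p.2 + 1)) ∨ (q.2 = p.2 ∧ (q.1 = p.1 + 1 ∨ q.1 = p.1 - 1))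

def stepR (my_colour : Int) (board : List (List Int)) (p q : Int × Int) : Prop :=
  inG q ∧ adjP p q ∧ cellAt board q = my_colour

def emptyNb (board : List (List Int)) (p : Int × Int) : Prop :=
  ∃ r, inG r ∧ adjP p r ∧ cellAt board r = 0

def Good (my_colour : Int) (board : List (List Int)) (p : Int × Int) : Prop :=
  ∃ q, Relation.ReflTransGen (stepR my_colour board) p q ∧ emptyNb board q

lemma mem_detect_neighbor {i j : Int} {q : Int × Int} :
    q ∈ detect_neighbor i j ↔ inG q ∧ adjP (i, j) q := by
  obtain ⟨a, b⟩ := q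
  simp only [detect_neighbor, List.mem_map, List.mem_filter, List.mem_cons, List.not_mem_nil,
    or_false, decide_eq_true_eq, inG, adjP, Prod.mk.injEq]
  constructor
  · rintro ⟨c, ⟨hc, hcond⟩, h1, h2⟩
    rcases hc with rfl|rfl|rfl|rfl <;> simp at hcond ⊢ <;> omega
  · rintro ⟨hin, hadj⟩
    rcases hadj with ⟨h1, h2 | h2⟩ | ⟨h1, h2 | h2⟩
    · exact ⟨(0, -1), ⟨by simp, by simp; omega⟩, by simp; omega⟩
    · exact ⟨(0, 1), ⟨by simp, by simp; omega⟩, by simp; omega⟩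
    · exact ⟨(1, 0), ⟨by simp, by simp; omega⟩, by simp; omega⟩
    · exact ⟨(-1, 0), ⟨by simp, by simp; omega⟩, by simp; omega⟩

lemma mem_neighboursB {c q : Int × Int} :
    q ∈ neighboursB c ↔ inG q ∧ adjP c q := by
  obtain ⟨i, j⟩ := c
  obtain ⟨a, b⟩ := q
  simp only [neighboursB, List.mem_map, List.mem_filter, List.mem_cons, List.not_mem_nil,
    or_false, decide_eq_true_eq, inG, adjP, Prod.mk.injEq]
  constructor
  · rintro ⟨c, ⟨hc, hcond⟩, h1, h2⟩
    rcases hc with rfl|rfl|rfl|rfl <;> simp at hcond ⊢ <;> omega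
  · rintro ⟨hin, hadj⟩
    rcases hadj with ⟨h1, h2 | h2⟩ | ⟨h1, h2 | h2⟩
    · exact ⟨(0, -1), ⟨by simp, by simp; omega⟩, by simp; omega⟩
    · exact ⟨(0, 1), ⟨by simp, by simp; omega⟩, by simp; omega⟩
    · exact ⟨(1, 0), ⟨by simp, by simp; omega⟩, by simp; omega⟩
    · exact ⟨(-1, 0), ⟨by simp, by simp; omega⟩, by simp; omega⟩

lemma mem_gridCells {p : Int × Int} : p ∈ gridCells ↔ inG p := by
  obtain ⟨a, b⟩ := p
  simp only [gridCells, List.mem_flatMap, List.mem_map, PySem.List.mem_pyRange_one, inG,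
    Prod.mk.injEq]
  constructor
  · rintro ⟨i, hi, j, hj, rfl, rfl⟩
    exact ⟨hi.1, hi.2, hj.1, hj.2⟩
  · rintro ⟨h1, h2, h3, h4⟩
    exact ⟨a, ⟨h1, h2⟩, b, ⟨h3, h4⟩, rfl, rfl⟩

lemma mem_mineB {my_colour : Int} {board : List (List Int)} {p : Int × Int} :
    p ∈ mineB my_colour board ↔ inG p ∧ cellAt board p = my_colour := by
  simp [mineB, List.mem_filter, mem_gridCells]

-- characterisation of the inner fold of chainLoop
lemma chainPush_foldl_spec (board : List (List Int)) (my_colour : Int) :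
    ∀ (L : List (Int × Int)) (s : List (Int × Int)) (v : PySem.Dict (Int × Int) Bool),
    (∀ p, (L.foldl (chainPush board my_colour) (s, v)).2.contains p = true ↔
      (v.contains p = true ∨ (p ∈ L ∧ cellAt board p = my_colour))) ∧
    (∀ p, p ∈ (L.foldl (chainPush board my_colour) (s, v)).1 ↔
      (p ∈ s ∨ (p ∈ L ∧ cellAt board p = my_colour ∧ v.contains p = false))) := by
  intro L
  induction L with
  | nil => intro s v; simp
  | cons x t ih =>
    intro s v
    simp only [List.foldl_cons]
    by_cases hcol : cellAt board x = my_colour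
    · by_cases hvis : v.contains x
      · have hstep : chainPush board my_colour (s, v) x = (s, v) := by
          simp [chainPush, hcol, hvis]
        rw [hstep]
        obtain ⟨ih1, ih2⟩ := ih s v
        refine ⟨fun p => ?_, fun p => ?_⟩
        · rw [ih1 p]
          by_cases hpx : p = x
          · subst hpx; simp [hvis, hcol]
          · simp only [List.mem_cons]
            tauto
        · rw [ih2 p]
          by_cases hpx : p = x
          · subst hpx; simp [hvis, hcol]
          · simp only [List.mem_cons]
            tauto
      · have hstep : chainPush board my_colour (s, v) x = (x :: s, v.insert x true) := by
          simp [chainPush, hcol, hvis]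
        rw [hstep]
        obtain ⟨ih1, ih2⟩ := ih (x :: s) (v.insert x true)
        have hvis' : v.contains x = false := by simpa using hvis
        refine ⟨fun p => ?_, fun p => ?_⟩
        · rw [ih1 p]
          by_cases hpx : p = x
          · subst hpx
            simp [hcol]
          · have hci : (v.insert x true).contains p = v.contains p := by
              rw [PySem.Dict.contains_insert]
              simp [hpx]
            rw [hci]
            simp only [List.mem_cons]
            tauto
        · rw [ih2 p]
          by_cases hpx : p = x
          · subst hpx
            have hci : (v.insert p true).contains p = true := by
              rw [PySem.Dict.contains_insert]; simp
            simp [hci, hvis', hcol]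
          · have hci : (v.insert x true).contains p = v.contains p := by
              rw [PySem.Dict.contains_insert]
              simp [hpx]
            rw [hci]
            simp only [List.mem_cons]
            tauto
    · have hstep : chainPush board my_colour (s, v) x = (s, v) := by
        simp [chainPush, hcol]
      rw [hstep]
      obtain ⟨ih1, ih2⟩ := ih s v
      refine ⟨fun p => ?_, fun p => ?_⟩
      · rw [ih1 p]
        by_cases hpx : p = x
        · subst hpx; simp only [List.mem_cons]; tauto
        · simp only [List.mem_cons]; tauto
      · rw [ih2 p]
        by_cases hpx : p = x
        · subst hpx; simp only [List.mem_cons]; tauto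
        · simp only [List.mem_cons]; tauto

-- DFS correctness for chainLoop
lemma chainLoop_spec (my_colour : Int) (board : List (List Int)) (s : Int × Int) :
    ∀ (stack : List (Int × Int)) (visited : PySem.Dict (Int × Int) Bool) (chain : List (Int × Int)),
    (∀ p, visited.contains p = true ↔ (p ∈ chain ∨ p ∈ stack)) →
    (∀ p ∈ chain, ∀ q, inG q → adjP p q → cellAt board q = my_colour → visited.contains q = true) →
    (∀ p, (p ∈ stack ∨ p ∈ chain) → Relation.ReflTransGen (stepR my_colour board) s p) →
    ((∀ p ∈ chainLoop board my_colour stack visited chain, Relation.ReflTransGen (stepR my_colour board) s p) ∧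
     (∀ p, visited.contains p = true → p ∈ chainLoop board my_colour stack visited chain) ∧
     (∀ p ∈ chainLoop board my_colour stack visited chain, ∀ q, inG q → adjP p q →
        cellAt board q = my_colour → q ∈ chainLoop board my_colour stack visited chain)) := by
  intro stack visited chain
  induction stack, visited, chain using chainLoop.induct (board := board) (my_colour := my_colour) with
  | case1 visited chain =>
    intro I1 I2 I3
    rw [chainLoop]
    refine ⟨fun p hp => I3 p (Or.inr hp), fun p hp => ?_, fun p hp q hg ha hc => ?_⟩
    · rcases (I1 p).1 hp with h | h
      · exact h
      · cases h
    · have hv := I2 p hp q hg ha hc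
      rcases (I1 q).1 hv with h | h
      · exact h
      · cases h
  | case2 cur rest visited chain sv ih =>
    intro I1 I2 I3
    rw [chainLoop]
    obtain ⟨S1, S2⟩ := chainPush_foldl_spec board my_colour (detect_neighbor cur.1 cur.2) rest visited
    have hcur : Relation.ReflTransGen (stepR my_colour board) s cur :=
      I3 cur (Or.inl (List.mem_cons_self ..))
    refine (fun H => ⟨H.1, fun p hp => H.2.1 p ((S1 p).2 (Or.inl hp)), H.2.2⟩) (ih ?_ ?_ ?_)
    · -- I1'
      intro p
      rw [S1 p, List.mem_append, List.mem_singleton, S2 p]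
      constructor
      · rintro (h | ⟨hm, hc⟩)
        · rcases (I1 p).1 h with h' | h'
          · exact Or.inl (Or.inl h')
          · rcases List.mem_cons.1 h' with rfl | h''
            · exact Or.inl (Or.inr rfl)
            · exact Or.inr (Or.inl h'')
        · by_cases hv : visited.contains p = true
          · rcases (I1 p).1 hv with h' | h'
            · exact Or.inl (Or.inl h')
            · rcases List.mem_cons.1 h' with rfl | h''
              · exact Or.inl (Or.inr rfl)
              · exact Or.inr (Or.inl h'')
          · exact Or.inr (Or.inr ⟨hm, hc, by simpa using hv⟩)
      · rintro ((h | h) | (h | ⟨hm, hc, hv⟩))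
        · exact Or.inl ((I1 p).2 (Or.inl h))
        · exact Or.inl ((I1 p).2 (Or.inr (h ▸ List.mem_cons_self ..)))
        · exact Or.inl ((I1 p).2 (Or.inr (List.mem_cons_of_mem _ h)))
        · exact Or.inr ⟨hm, hc⟩
    · -- I2'
      intro p hp q hg ha hc
      rw [S1 q]
      rcases List.mem_append.1 hp with hp' | hp'
      · exact Or.inl (I2 p hp' q hg ha hc)
      · have hpc : p = cur := List.mem_singleton.1 hp'
        subst hpc
        refine Or.inr ⟨?_, hc⟩
        exact mem_detect_neighbor.2 ⟨hg, by simpa using ha⟩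
    · -- I3'
      intro p hp
      rcases hp with hp | hp
      · rcases (S2 p).1 hp with h | ⟨hm, hc, _⟩
        · exact I3 p (Or.inl (List.mem_cons_of_mem _ h))
        · have hd := mem_detect_neighbor.1 hm
          exact Relation.ReflTransGen.tail hcur ⟨hd.1, by simpa using hd.2, hc⟩
      · rcases List.mem_append.1 hp with hp' | hp'
        · exact I3 p (Or.inr hp')
        · have : p = cur := List.mem_singleton.1 hp'
          subst this
          exact hcur

lemma mem_chain_stones {my_colour i j : Int} {board : List (List Int)} {p : Int × Int} :
    p ∈ chain_stones i j board my_colour ↔ Relation.ReflTransGen (stepR my_colour board) (i, j) p := by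
  have hinit : ∀ q : Int × Int, (PySem.Dict.empty.insert (i, j) true).contains q = true ↔
      (q ∈ ([] : List (Int × Int)) ∨ q ∈ [(i, j)]) := by
    intro q
    rw [PySem.Dict.contains_insert]
    simp
  obtain ⟨C1, C2, C3⟩ := chainLoop_spec my_colour board (i, j) [(i, j)]
    (PySem.Dict.empty.insert (i, j) true) [] hinit (by simp)
    (by
      rintro q (hq | hq)
      · rw [List.mem_singleton] at hq
        subst hq
        exact Relation.ReflTransGen.refl
      · cases hq)
  constructor
  · exact C1 p
  · intro h
    induction h with
    | refl =>
      exact C2 (i, j) (by rw [PySem.Dict.contains_insert]; simp)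
    | tail hab hbc ihx =>
      exact C3 _ ihx _ hbc.1 hbc.2.1 hbc.2.2

lemma has_liberty_iff {my_colour i j : Int} {board : List (List Int)} :
    has_liberty i j board my_colour = true ↔ Good my_colour board (i, j) := by
  simp only [has_liberty, List.any_eq_true, mem_chain_stones, mem_detect_neighbor, beq_iff_eq,
    Good, emptyNb]
  constructor
  · rintro ⟨p, hr, n, ⟨hg, ha⟩, hc⟩
    exact ⟨p, hr, n, hg, by simpa using ha, hc⟩
  · rintro ⟨p, hr, n, hg, ha, hc⟩
    exact ⟨p, hr, n, ⟨hg, by simpa using ha⟩, hc⟩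

-- B side
lemma mem_aliveStep {my_colour : Int} {board : List (List Int)} {X : PySem.Set (Int × Int)} {p : Int × Int} :
    p ∈ aliveStep my_colour board X ↔
      p ∈ X ∨ (inG p ∧ cellAt board p = my_colour ∧ ∃ q, inG q ∧ adjP p q ∧ q ∈ X) := by
  simp only [aliveStep, PySem.Set.mem_union, PySem.Set.mem_ofList, List.mem_filter,
    mem_mineB, List.any_eq_true, mem_neighboursB, PySem.Set.contains_iff]
  constructor
  · rintro (h | ⟨⟨hg, hc⟩, n, ⟨hng, hna⟩, hn⟩)
    · exact Or.inl h
    · exact Or.inr ⟨hg, hc, n, hng, hna, hn⟩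
  · rintro (h | ⟨hg, hc, n, hng, hna, hn⟩)
    · exact Or.inl h
    · exact Or.inr ⟨⟨hg, hc⟩, n, ⟨hng, hna⟩, hn⟩

def alive0 (my_colour : Int) (board : List (List Int)) : PySem.Set (Int × Int) :=
  PySem.Set.ofList ((mineB my_colour board).filter fun c =>
    (neighboursB c).any fun n => cellAt board n == 0)

lemma mem_alive0 {my_colour : Int} {board : List (List Int)} {p : Int × Int} :
    p ∈ alive0 my_colour board ↔ inG p ∧ cellAt board p = my_colour ∧ emptyNb board p := by
  simp only [alive0, PySem.Set.mem_ofList, List.mem_filter, mem_mineB, List.any_eq_true,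
    mem_neighboursB, beq_iff_eq, emptyNb]
  constructor
  · rintro ⟨⟨hg, hc⟩, n, ⟨hng, hna⟩, hn⟩
    exact ⟨hg, hc, n, hng, hna, hn⟩
  · rintro ⟨hg, hc, n, hng, hna, hn⟩
    exact ⟨⟨hg, hc⟩, n, ⟨hng, hna⟩, hn⟩

lemma aliveB_eq_iterate (my_colour : Int) (board : List (List Int)) :
    aliveB my_colour board = (aliveStep my_colour board)^[25] (alive0 my_colour board) := by
  have hfold : ∀ {α : Type} (f : α → α) (l : List Int) (init : α),
      l.foldl (fun a _ => f a) init = f^[l.length] init := by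
    intro α f l
    induction l with
    | nil => intro init; rfl
    | cons x t iht => intro init; simp [iht, Function.iterate_succ_apply]
  rw [aliveB, hfold, PySem.List.length_pyRange_one]
  rfl

lemma alive_sound (my_colour : Int) (board : List (List Int)) :
    ∀ (k : Nat) (p : Int × Int), p ∈ (aliveStep my_colour board)^[k] (alive0 my_colour board) →
      inG p ∧ cellAt board p = my_colour ∧ Good my_colour board p := by
  intro k
  induction k with
  | zero =>
    intro p hp
    obtain ⟨hg, hc, hlib⟩ := mem_alive0.1 hp
    exact ⟨hg, hc, p, Relation.ReflTransGen.refl, hlib⟩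
  | succ k ihk =>
    intro p hp
    rw [Function.iterate_succ_apply'] at hp
    rcases mem_aliveStep.1 hp with h | ⟨hg, hc, q, hqg, hqa, hq⟩
    · exact ihk p h
    · obtain ⟨_, hqc, r, hrr, hrl⟩ := ihk q hq
      exact ⟨hg, hc, r, Relation.ReflTransGen.head ⟨hqg, hqa, hqc⟩ hrr, hrl⟩

def iterAlive (my_colour : Int) (board : List (List Int)) (k : Nat) : PySem.Set (Int × Int) :=
  (aliveStep my_colour board)^[k] (alive0 my_colour board)

lemma iterAlive_succ (my_colour : Int) (board : List (List Int)) (k : Nat) :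
    iterAlive my_colour board (k + 1) = aliveStep my_colour board (iterAlive my_colour board k) :=
  Function.iterate_succ_apply' _ _ _

lemma mem_iterAlive_succ (my_colour : Int) (board : List (List Int)) (k : Nat) (x : Int × Int)
    (hx : x ∈ iterAlive my_colour board k) : x ∈ iterAlive my_colour board (k + 1) := by
  rw [iterAlive_succ]
  exact mem_aliveStep.2 (Or.inl hx)

lemma mem_iterAlive_le (my_colour : Int) (board : List (List Int)) {k m : Nat} (hkm : k ≤ m) :
    ∀ x, x ∈ iterAlive my_colour board k → x ∈ iterAlive my_colour board m := by
  induction hkm with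
  | refl => exact fun x hx => hx
  | step h2 ih => exact fun x hx => mem_iterAlive_succ _ _ _ x (ih x hx)

lemma aliveStep_congr (my_colour : Int) (board : List (List Int))
    (X Y : PySem.Set (Int × Int)) (hXY : ∀ x, x ∈ X ↔ x ∈ Y) (x : Int × Int) :
    x ∈ aliveStep my_colour board X ↔ x ∈ aliveStep my_colour board Y := by
  constructor
  · intro hx
    rcases mem_aliveStep.1 hx with h | ⟨hg2, hc2, q, hqg, hqa, hq⟩
    · exact mem_aliveStep.2 (Or.inl ((hXY x).1 h))
    · exact mem_aliveStep.2 (Or.inr ⟨hg2, hc2, q, hqg, hqa, (hXY q).1 hq⟩)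
  · intro hx
    rcases mem_aliveStep.1 hx with h | ⟨hg2, hc2, q, hqg, hqa, hq⟩
    · exact mem_aliveStep.2 (Or.inl ((hXY x).2 h))
    · exact mem_aliveStep.2 (Or.inr ⟨hg2, hc2, q, hqg, hqa, (hXY q).2 hq⟩)

lemma nodup_iterAlive (my_colour : Int) (board : List (List Int)) (k : Nat) :
    (iterAlive my_colour board k).Nodup := by
  induction k with
  | zero => exact PySem.Set.nodup_ofList _
  | succ k ih =>
    rw [iterAlive_succ]
    exact PySem.Set.nodup_union _ _ ih

lemma iterAlive_stable (my_colour : Int) (board : List (List Int)) {k : Nat}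
    (h : ∀ x, x ∈ iterAlive my_colour board (k + 1) → x ∈ iterAlive my_colour board k) :
    ∀ j x, x ∈ iterAlive my_colour board (k + j) ↔ x ∈ iterAlive my_colour board k := by
  intro j
  induction j with
  | zero => intro x; rfl
  | succ j ihj =>
    intro x
    have harr : k + (j + 1) = (k + j) + 1 := rfl
    rw [harr, iterAlive_succ]
    calc x ∈ aliveStep my_colour board (iterAlive my_colour board (k + j))
        ↔ x ∈ aliveStep my_colour board (iterAlive my_colour board k) :=
          aliveStep_congr _ _ _ _ ihj x
      _ ↔ x ∈ iterAlive my_colour board (k + 1) := by rw [iterAlive_succ]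
      _ ↔ x ∈ iterAlive my_colour board k := ⟨h x, mem_iterAlive_succ _ _ _ x⟩

lemma mem_pvGrid_of_inG {p : Int × Int} (h : inG p) : p ∈ pvGrid := by
  obtain ⟨a, b⟩ := p
  exact pair_mem_pvGrid h.1 h.2.1 h.2.2.1 h.2.2.2

lemma reach_endpoint {my_colour : Int} {board : List (List Int)} {p q : Int × Int}
    (h : Relation.ReflTransGen (stepR my_colour board) p q)
    (hp : inG p ∧ cellAt board p = my_colour) : inG q ∧ cellAt board q = my_colour := by
  induction h with
  | refl => exact hp
  | tail _ hbc _ => exact ⟨hbc.1, hbc.2.2⟩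

lemma alive_complete (my_colour : Int) (board : List (List Int)) (p : Int × Int)
    (hg : inG p) (hc : cellAt board p = my_colour) (hgood : Good my_colour board p) :
    p ∈ (aliveStep my_colour board)^[25] (alive0 my_colour board) := by
  show p ∈ iterAlive my_colour board 25
  by_cases hfix : ∃ k, k < 25 ∧ ∀ x : Int × Int,
      x ∈ iterAlive my_colour board (k + 1) → x ∈ iterAlive my_colour board k
  · obtain ⟨k, hk25, hsub⟩ := hfix
    have hstab := iterAlive_stable my_colour board hsub
    have h25k : ∀ x : Int × Int, x ∈ iterAlive my_colour board 25 ↔ x ∈ iterAlive my_colour board k := by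
      intro x
      have : k + (25 - k) = 25 := by omega
      rw [← this]
      exact hstab (25 - k) x
    have hclosed : ∀ x : Int × Int,
        x ∈ aliveStep my_colour board (iterAlive my_colour board 25) ↔ x ∈ iterAlive my_colour board 25 := by
      intro x
      calc x ∈ aliveStep my_colour board (iterAlive my_colour board 25)
          ↔ x ∈ aliveStep my_colour board (iterAlive my_colour board k) :=
            aliveStep_congr _ _ _ _ h25k x
        _ ↔ x ∈ iterAlive my_colour board (k + 1) := by rw [iterAlive_succ]
        _ ↔ x ∈ iterAlive my_colour board k := ⟨hsub x, mem_iterAlive_succ _ _ _ x⟩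
        _ ↔ x ∈ iterAlive my_colour board 25 := (h25k x).symm
    obtain ⟨q, hreach, hlib⟩ := hgood
    have hq := reach_endpoint hreach ⟨hg, hc⟩
    have hq0 : q ∈ iterAlive my_colour board 0 := mem_alive0.2 ⟨hq.1, hq.2, hlib⟩
    have hq25 : q ∈ iterAlive my_colour board 25 :=
      mem_iterAlive_le my_colour board (by omega) q hq0
    have hmine : inG p ∧ cellAt board p = my_colour := ⟨hg, hc⟩
    clear hc hg
    revert hmine
    induction hreach using Relation.ReflTransGen.head_induction_on with
    | refl => exact fun _ => hq25
    | head h h' ih =>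
      rintro ⟨hga, hca⟩
      have hb := ih ⟨h.1, h.2.2⟩
      exact (hclosed _).1
        (mem_aliveStep.2 (Or.inr ⟨hga, hca, _, h.1, h.2.1, hb⟩))
  · push Not at hfix
    have hgrow : ∀ k, k < 25 → ∃ x, x ∈ iterAlive my_colour board (k + 1) ∧
        x ∉ iterAlive my_colour board k := hfix
    have hlen : ∀ k, k ≤ 25 → k ≤ (iterAlive my_colour board k).length := by
      intro k
      induction k with
      | zero => intro _; omega
      | succ k ihk =>
        intro hk
        have hlk := ihk (by omega)
        obtain ⟨x, hx1, hx2⟩ := hgrow k (by omega)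
        have hsubf : (iterAlive my_colour board k).toFinset ⊆
            (iterAlive my_colour board (k + 1)).toFinset := by
          intro y hy
          rw [List.mem_toFinset] at *
          exact mem_iterAlive_succ _ _ _ y hy
        have hss : (iterAlive my_colour board k).toFinset ⊂
            (iterAlive my_colour board (k + 1)).toFinset :=
          ⟨hsubf, fun hsup => hx2 (List.mem_toFinset.1 (hsup (List.mem_toFinset.2 hx1)))⟩
        have hcard := Finset.card_lt_card hss
        rw [List.toFinset_card_of_nodup (nodup_iterAlive my_colour board k),
          List.toFinset_card_of_nodup (nodup_iterAlive my_colour board (k + 1))] at hcard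
        omega
    have h25 : 25 ≤ (iterAlive my_colour board 25).length := hlen 25 le_rfl
    have hsubg : (iterAlive my_colour board 25).toFinset ⊆ pvGrid.toFinset := by
      intro y hy
      rw [List.mem_toFinset] at hy ⊢
      exact mem_pvGrid_of_inG (alive_sound my_colour board 25 y hy).1
    have hcards : pvGrid.toFinset.card ≤ (iterAlive my_colour board 25).toFinset.card := by
      rw [List.toFinset_card_of_nodup (nodup_iterAlive my_colour board 25)]
      have hgc : pvGrid.toFinset.card = 25 := by decide
      omega
    have heq := Finset.eq_of_subset_of_card_le hsubg hcards
    have hpg : p ∈ pvGrid.toFinset := List.mem_toFinset.2 (mem_pvGrid_of_inG hg)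
    rw [← heq] at hpg
    exact List.mem_toFinset.1 hpg

-- the per-cell equivalence
lemma cell_iff (my_colour : Int) (board : List (List Int)) (p : Int × Int) (hg : inG p) :
    (cellAt board p == my_colour && !has_liberty p.1 p.2 board my_colour) =
    (cellAt board p == my_colour && !PySem.Set.contains (aliveB my_colour board) p) := by
  by_cases hcol : cellAt board p = my_colour
  · have hb : (cellAt board p == my_colour) = true := by simp [hcol]
    rw [hb, Bool.true_and, Bool.true_and]
    have hmain : has_liberty p.1 p.2 board my_colour =
        PySem.Set.contains (aliveB my_colour board) p := by
      rw [Bool.eq_iff_iff, PySem.Set.contains_iff, aliveB_eq_iterate, has_liberty_iff]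
      constructor
      · intro h
        exact alive_complete _ _ p hg hcol (by simpa using h)
      · intro h
        simpa using (alive_sound _ _ 25 p h).2.2
    rw [hmain]
  · have hb : (cellAt board p == my_colour) = false := by simp [hcol]
    rw [hb, Bool.false_and, Bool.false_and]

-- ===== VERDICT (by name: the statement is the Claim_ definition above) =====
theorem stones_died_spec : Claim_equal_stones_died := by
  intro my_colour board _ _
  show stones_died my_colour board = stones_died_alt my_colour board
  have hifm : ∀ (dead : List (Int × Int)) (c1 c2 : Bool) (x : Int × Int),
      (if c1 then if c2 then dead ++ [x] else dead else dead) =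
      (if c1 && c2 then dead ++ [x] else dead) := by
    intro dead c1 c2 x
    cases c1 <;> cases c2 <;> simp
  have hA : stones_died my_colour board =
      (PySem.List.pyRange 0 5 1).flatMap (fun i =>
        ((PySem.List.pyRange 0 5 1).filter (fun j =>
          cellAt board (i, j) == my_colour && !has_liberty i j board my_colour)).map
          (fun j => ((i : Int), (j : Int)))) := by
    rw [stones_died]
    simp only [hifm, PySem.List.foldl_append_if, PySem.List.foldl_append_eq_flatMap,
      List.nil_append]
  have hB : stones_died_alt my_colour board =
      (PySem.List.pyRange 0 5 1).flatMap (fun i =>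
        ((PySem.List.pyRange 0 5 1).filter
          ((fun c => !PySem.Set.contains (aliveB my_colour board) c &&
            (cellAt board c == my_colour)) ∘ (fun j => ((i : Int), (j : Int))))).map
          (fun j => ((i : Int), (j : Int)))) := by
    rw [stones_died_alt, mineB, List.filter_filter, gridCells, List.filter_flatMap]
    simp only [List.filter_map]
  rw [hA, hB]
  apply List.flatMap_congr
  intro i hi
  apply congrArg (List.map _)
  apply List.filter_congr
  intro j hj
  have hi5 := PySem.List.mem_pyRange_one.1 hi
  have hj5 := PySem.List.mem_pyRange_one.1 hj
  have hg : inG ((i : Int), (j : Int)) := ⟨hi5.1, hi5.2, hj5.1, hj5.2⟩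
  have h2 : (cellAt board ((i : Int), (j : Int)) == my_colour && !has_liberty i j board my_colour) =
      (cellAt board (i, j) == my_colour && !PySem.Set.contains (aliveB my_colour board) (i, j)) :=
    cell_iff my_colour board (i, j) hg
  simp only [Function.comp]
  rw [h2]
  exact Bool.and_comm _ _
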